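-- pv_equiv track=rewrite | github.com/FAIRmat-NFDI/pynxtools | pynxtools/dataconverter/readers/shared/map_concepts/mapping_functors.py | variadic_path_to_specific_path
-- ===== SOURCE A (Python) =====
-- def variadic_path_to_specific_path(path, instance_identifier: list):
--     """Transforms a variadic path to an actual path with instances."""
--     if (path is not None) and (path != ""):
--         narguments = path.count("*")
--         if narguments == 0:  # path is not variadic
--             return path
--         if len(instance_identifier) >= narguments:
--             tmp = path.split("*")
--             if len(tmp) == narguments + 1:
--                 nx_specific_path = ""
--                 for idx in range(0, narguments):
--                     nx_specific_path += f"{tmp[idx]}{instance_identifier[idx]}"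
--                     idx += 1
--                 nx_specific_path += f"{tmp[-1]}"
--                 return nx_specific_path
--     return None
-- ===== SOURCE B (Python) =====
-- def variadic_path_to_specific_path(path, instance_identifier: list):
--     """Transforms a variadic path to an actual path with instances.
--
--     Single left-to-right scan of the path: each '*' consumes the next
--     identifier; no split/count passes and no temporary piece list.
--     """
--     if not path:
--         return None
--     out = []
--     remaining = list(instance_identifier)
--     for ch in path:
--         if ch == "*":
--             if not remaining:
--                 return None
--             out.append(f"{remaining.pop(0)}")
--         else:
--             out.append(ch)
--     return "".join(out)
-- ===== Notes on version B (the rewrite author's own statement) =====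
-- stated objective: alternative
-- what changed: Replaces A's count-then-split-then-interleave (three passes over the path plus a temporary piece list) by a single character scan that copies normal characters and substitutes the next identifier at each '*', returning None as soon as identifiers run out.
import Mathlib
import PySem

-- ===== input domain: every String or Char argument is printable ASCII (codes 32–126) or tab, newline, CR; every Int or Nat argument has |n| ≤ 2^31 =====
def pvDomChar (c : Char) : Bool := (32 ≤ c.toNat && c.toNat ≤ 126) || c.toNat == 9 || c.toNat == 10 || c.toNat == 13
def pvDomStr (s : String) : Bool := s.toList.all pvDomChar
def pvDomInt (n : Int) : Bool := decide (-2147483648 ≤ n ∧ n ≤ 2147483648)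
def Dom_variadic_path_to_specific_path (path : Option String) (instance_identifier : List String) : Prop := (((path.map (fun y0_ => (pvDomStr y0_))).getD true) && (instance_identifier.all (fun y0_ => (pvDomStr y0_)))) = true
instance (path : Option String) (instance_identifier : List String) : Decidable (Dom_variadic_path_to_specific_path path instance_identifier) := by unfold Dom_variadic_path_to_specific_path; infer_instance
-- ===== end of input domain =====

-- B replaces A's count/split/interleave passes by a single character scan that
-- substitutes the next identifier at each '*' (alternative decomposition, same cost).


-- ===== PORT A =====
def variadic_path_to_specific_path (path : Option String) (instance_identifier : List String) : Option String :=
  match path with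
  | none => none
  | some p =>
    if p ≠ "" then
      let narguments := PySem.Str.count p "*"
      if narguments = 0 then some p
      else if instance_identifier.length ≥ narguments then
        -- path.split("*"): the separator is the literal "*" ≠ "", so Str.split? is always `some`; `.getD []` is exact here
        let tmp := (PySem.Str.split? p "*").getD []
        if tmp.length = narguments + 1 then
          let nx_specific_path :=
            (PySem.List.pyRange 0 (narguments : Int)).foldl
              (fun acc idx =>
                acc ++ (PySem.List.pyGetD tmp idx "" ++ PySem.List.pyGetD instance_identifier idx ""))
              ""
          some (nx_specific_path ++ PySem.List.pyGetD tmp (-1) "")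
        else none
      else none
    else none

-- ===== PORT B =====
-- the for-loop over the characters, with `out` accumulator, `remaining` identifiers
-- and the early `return None` when `remaining` is exhausted at a '*'
def pvSubstGo : List Char → List String → List Char → Option (List Char)
  | [], _, out => some out
  | c :: cs, ids, out =>
    if c = '*' then
      match ids with
      | [] => none
      | i :: rest => pvSubstGo cs rest (out ++ i.toList)
    else pvSubstGo cs ids (out ++ [c])

def variadic_path_to_specific_path_alt (path : Option String) (instance_identifier : List String) : Option String :=
  match path with
  | none => none
  | some p =>
    if p = "" then none
    else (pvSubstGo p.toList instance_identifier []).map String.ofList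

-- ===== PRECONDITION & SPEC =====
def Spec_variadic_path_to_specific_path (path : Option String) (instance_identifier : List String) (out : Option String) : Prop := out = variadic_path_to_specific_path_alt path instance_identifier
instance (path : Option String) (instance_identifier : List String) (out : Option String) : Decidable (Spec_variadic_path_to_specific_path path instance_identifier out) := by unfold Spec_variadic_path_to_specific_path; infer_instance

-- ===== CLAIM (what is proved, stated in full; the proofs are below) =====
def Claim_equal_variadic_path_to_specific_path : Prop := ∀ (path : Option String) (instance_identifier : List String), Dom_variadic_path_to_specific_path path instance_identifier → Spec_variadic_path_to_specific_path path instance_identifier (variadic_path_to_specific_path path instance_identifier)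

-- ===== LEMMAS AND PROOFS =====

-- reference split of a char list on '*' (what Python's path.split("*") yields, as char lists)
def pvSplit : List Char → List (List Char)
  | [] => [[]]
  | c :: t => if c = '*' then [] :: pvSplit t else (pvSplit t).modifyHead (c :: ·)

-- reference interleaving of split pieces with identifiers
def pvGlue : List (List Char) → List String → List Char
  | [], _ => []
  | [p], _ => p
  | p :: ps, ids => p ++ (ids.headD "").toList ++ pvGlue ps ids.tail

theorem pvSplit_ne_nil (cs : List Char) : pvSplit cs ≠ [] := by
  cases cs with
  | nil => simp [pvSplit]
  | cons c t =>
    simp only [pvSplit]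
    split_ifs
    · simp
    · cases h : pvSplit t with
      | nil => exact absurd h (pvSplit_ne_nil t)
      | cons q qs => simp []

theorem pvSplit_length (cs : List Char) : (pvSplit cs).length = cs.count '*' + 1 := by
  induction cs with
  | nil => simp [pvSplit]
  | cons c t ih =>
    by_cases h : c = '*'
    · simp [pvSplit, h, ih]
    · simp [pvSplit, h, ih]

theorem pvSplit_of_count_zero (cs : List Char) (h : cs.count '*' = 0) : pvSplit cs = [cs] := by
  induction cs with
  | nil => rfl
  | cons c t ih =>
    rw [List.count_cons] at h
    have hc : ¬ c = '*' := by intro hc; simp [hc] at h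
    have ht : t.count '*' = 0 := by omega
    simp [pvSplit, hc, ih ht]

-- Chars.count with the one-character separator '*' is List.count
theorem pvCountGo_spec (fuel : Nat) (l : List Char) (acc : Nat) (h : l.length ≤ fuel) :
    PySem.Chars.count.go ['*'] fuel l acc = acc + l.count '*' := by
  induction fuel generalizing l acc with
  | zero =>
    have hl : l = [] := List.length_eq_zero_iff.mp (Nat.le_zero.mp h)
    subst hl; simp [PySem.Chars.count.go]
  | succ n ih =>
    cases l with
    | nil => simp [PySem.Chars.count.go]
    | cons c t =>
      rw [List.length_cons] at h
      have h' := Nat.le_of_succ_le_succ h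
      by_cases hc : c = '*'
      · subst hc
        simp only [PySem.Chars.count.go, List.isPrefixOf, beq_self_eq_true, Bool.true_and,
          if_true, List.length_cons, List.drop_succ_cons,
          List.length_nil, List.drop_zero]
        rw [ih t (acc + 1) h']
        simp []; omega
      · have hb : ('*' == c) = false := beq_eq_false_iff_ne.mpr (Ne.symm hc)
        simp only [PySem.Chars.count.go, List.isPrefixOf, hb, Bool.false_and]
        rw [ih t acc h']
        simp [hc]

theorem pvCount_star (cs : List Char) : PySem.Chars.count cs ['*'] = cs.count '*' := by
  simp only [PySem.Chars.count, List.isEmpty_cons]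
  simpa using pvCountGo_spec cs.length cs 0 (Nat.le_refl _)

-- Chars.splitOn with separator '*' is pvSplit
theorem pvSplitGo_spec (fuel : Nat) (l cur : List Char) (acc : List (List Char)) (h : l.length ≤ fuel) :
    PySem.Chars.splitOn.go ['*'] fuel l cur acc
      = acc.reverse ++ (pvSplit l).modifyHead (cur.reverse ++ ·) := by
  induction fuel generalizing l cur acc with
  | zero =>
    have hl : l = [] := List.length_eq_zero_iff.mp (Nat.le_zero.mp h)
    subst hl; simp [PySem.Chars.splitOn.go, pvSplit]
  | succ n ih =>
    cases l with
    | nil => simp [PySem.Chars.splitOn.go, pvSplit]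
    | cons c t =>
      rw [List.length_cons] at h
      have h' := Nat.le_of_succ_le_succ h
      cases hq : pvSplit t with
      | nil => exact absurd hq (pvSplit_ne_nil t)
      | cons q qs =>
        by_cases hc : c = '*'
        · subst hc
          simp only [PySem.Chars.splitOn.go, List.isPrefixOf, beq_self_eq_true, Bool.true_and,
            if_true, List.length_cons, List.drop_succ_cons,
            List.length_nil, List.drop_zero]
          rw [ih t [] (cur.reverse :: acc) h', hq]
          simp [pvSplit, hq]
        · have hb : ('*' == c) = false := beq_eq_false_iff_ne.mpr (Ne.symm hc)
          simp only [PySem.Chars.splitOn.go, List.isPrefixOf, hb, Bool.false_and]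
          rw [ih t (c :: cur) acc h']
          simp [pvSplit, hc, hq, List.append_assoc]

theorem pvSplitOn_star (cs : List Char) : PySem.Chars.splitOn cs ['*'] = pvSplit cs := by
  cases hq : pvSplit cs with
  | nil => exact absurd hq (pvSplit_ne_nil cs)
  | cons q qs =>
    unfold PySem.Chars.splitOn
    rw [pvSplitGo_spec (cs.length + 1) cs [] [] (by omega), hq]
    simp

theorem pvGlue_cons_head (c : Char) (q : List Char) (qs : List (List Char)) (ids : List String) :
    pvGlue ((c :: q) :: qs) ids = c :: pvGlue (q :: qs) ids := by
  cases qs <;> simp [pvGlue]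

-- B's scan computes the glued interleaving exactly when enough identifiers are present
theorem pvSubstGo_spec (cs : List Char) (ids : List String) (out : List Char) :
    pvSubstGo cs ids out
      = if cs.count '*' ≤ ids.length then some (out ++ pvGlue (pvSplit cs) ids) else none := by
  induction cs generalizing ids out with
  | nil => simp [pvSubstGo, pvSplit, pvGlue]
  | cons c t ih =>
    cases hq : pvSplit t with
    | nil => exact absurd hq (pvSplit_ne_nil t)
    | cons q qs =>
      by_cases hc : c = '*'
      · subst hc
        cases ids with
        | nil => simp [pvSubstGo]
        | cons i is =>
          have hstep : pvSubstGo ('*' :: t) (i :: is) out = pvSubstGo t is (out ++ i.toList) := by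
            simp [pvSubstGo]
          rw [hstep, ih is (out ++ i.toList)]
          simp [pvSplit, hq, pvGlue, List.append_assoc]
      · simp only [pvSubstGo, if_neg hc]
        rw [ih ids (out ++ [c])]
        simp [hc, pvSplit, hq, pvGlue_cons_head, List.append_assoc]

-- A's fold, read as char lists
theorem pvToListFoldl (l : List Int) (g : Int → String) (s : String) :
    (l.foldl (fun acc i => acc ++ g i) s).toList = s.toList ++ l.flatMap (fun i => (g i).toList) := by
  induction l generalizing s with
  | nil => simp
  | cons x xs ih => simp [List.foldl_cons, ih, String.toList_append]

theorem pvGetD_map_ofList (P : List (List Char)) (k : Nat) :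
    ((P.map String.ofList).getD k "").toList = P.getD k [] := by
  induction P generalizing k with
  | nil => simp
  | cons p ps ih => cases k <;> simp [String.toList_ofList]

theorem pvPyGetD_neg_one (P : List (List Char)) (h : P ≠ []) :
    (PySem.List.pyGetD (P.map String.ofList) (-1) "").toList = P.getLast?.getD [] := by
  have hlen : 0 < P.length := List.length_pos_iff.mpr h
  simp only [PySem.List.pyGetD, PySem.List.pyGet?, PySem.List.pyIdx?, List.length_map]
  have h1 : ¬ (0 : Int) ≤ -1 := by norm_num
  have h2 : -(P.length : Int) ≤ -1 := by omega
  simp only [h1, if_false, h2, if_true, Option.bind_some]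
  have h3 : (-(-1 : Int)).toNat = 1 := rfl
  rw [h3]
  have h4 : (List.map String.ofList P)[P.length - 1]? = P.getLast?.map String.ofList := by
    rw [List.getElem?_map, ← List.getLast?_eq_getElem?]
  rw [h4]
  cases hL : P.getLast? with
  | none => rw [List.getLast?_eq_none_iff] at hL; exact absurd hL h
  | some x => simp [String.toList_ofList]

theorem pvRangeGlue (Q : List (List Char)) (q : List Char) (ids : List String)
    (h : Q.length ≤ ids.length) :
    (List.range Q.length).flatMap
        (fun k => (q :: Q).getD k [] ++ ((ids.getD k "").toList))
      ++ ((q :: Q).getLast?.getD [])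
      = pvGlue (q :: Q) ids := by
  induction Q generalizing q ids with
  | nil => simp [pvGlue]
  | cons r R ih =>
    cases ids with
    | nil => simp at h
    | cons i is =>
      have h' : R.length ≤ is.length := by simpa using h
      rw [List.length_cons, List.range_succ_eq_map]
      simp only [List.flatMap_cons, List.flatMap_map, List.getD_cons_zero,
        List.getD_cons_succ, List.getLast?_cons_cons]
      have hglue : pvGlue (q :: r :: R) (i :: is) = q ++ i.toList ++ pvGlue (r :: R) is := by
        simp [pvGlue]
      rw [hglue, ← ih r is h']
      simp [List.append_assoc]

theorem pvStringEqOfToList (a b : String) (h : a.toList = b.toList) : a = b := by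
  rw [← String.ofList_toList (s := a), h, String.ofList_toList]

-- ===== VERDICT (by name: the statement is the Claim_ definition above) =====
theorem variadic_path_to_specific_path_spec : Claim_equal_variadic_path_to_specific_path := by
  intro path ids _
  unfold Spec_variadic_path_to_specific_path
  cases path with
  | none => rfl
  | some p =>
    by_cases hp : p = ""
    · simp [variadic_path_to_specific_path, variadic_path_to_specific_path_alt, hp]
    · have hcount : PySem.Str.count p "*" = p.toList.count '*' := by
        rw [PySem.Str.count_eq]
        have : ("*" : String).toList = ['*'] := rfl
        rw [this, pvCount_star]
      by_cases h0 : p.toList.count '*' = 0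
      · -- not variadic: A returns path itself; B's scan copies it verbatim
        simp only [variadic_path_to_specific_path, variadic_path_to_specific_path_alt,
          ne_eq, hp, not_false_eq_true, if_true, if_false, hcount, h0]
        rw [pvSubstGo_spec, pvSplit_of_count_zero _ h0]
        simp [pvGlue, h0, String.ofList_toList]
      · -- variadic
        have htmp : (PySem.Str.split? p "*").getD [] = (pvSplit p.toList).map String.ofList := by
          simp only [PySem.Str.split?, PySem.Chars.split?]
          have hsep : ("*" : String).toList = ['*'] := rfl
          rw [hsep]
          simp [pvSplitOn_star]
        by_cases hlen : p.toList.count '*' ≤ ids.length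
        · -- enough identifiers: both substitute
          cases hq : pvSplit p.toList with
          | nil => exact absurd hq (pvSplit_ne_nil p.toList)
          | cons q Q =>
            have hQlen : Q.length = p.toList.count '*' := by
              have := pvSplit_length p.toList
              rw [hq] at this; simpa using this
            simp only [variadic_path_to_specific_path, variadic_path_to_specific_path_alt,
              ne_eq, hp, not_false_eq_true, if_true, if_false, hcount, if_neg h0, ge_iff_le,
              if_pos hlen, htmp, hq]
            have hlentmp : ((q :: Q).map String.ofList).length = p.toList.count '*' + 1 := by
              simp [hQlen]
            rw [if_pos hlentmp]
            rw [pvSubstGo_spec, if_pos hlen]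
            refine congrArg some (pvStringEqOfToList _ _ ?_)
            rw [String.toList_append, pvToListFoldl]
            have hrange : PySem.List.pyRange 0 ((p.toList.count '*' : Nat) : Int)
                = (List.range (p.toList.count '*')).map (fun k : Nat => (k : Int)) :=
              PySem.List.pyRange_zero_natCast _
            have hflat :
                ((List.range (p.toList.count '*')).map (fun k : Nat => (k : Int))).flatMap
                  (fun i : Int =>
                    ((PySem.List.pyGetD ((q :: Q).map String.ofList) i ""
                      ++ PySem.List.pyGetD ids i "").toList))
                = (List.range (p.toList.count '*')).flatMap (fun k =>
                    (q :: Q).getD k [] ++ (ids.getD k "").toList) := by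
              rw [List.flatMap_map]
              refine List.flatMap_congr (fun k _ => ?_)
              rw [String.toList_append, PySem.List.pyGetD_natCast, PySem.List.pyGetD_natCast,
                pvGetD_map_ofList]
            rw [hrange]
            rw [hflat, pvPyGetD_neg_one (q :: Q) (by simp)]
            rw [String.toList_ofList, List.nil_append, ← hQlen]
            have hQle : Q.length ≤ ids.length := by omega
            simpa [hq] using pvRangeGlue Q q ids hQle
        · -- not enough identifiers: both return none
          simp only [variadic_path_to_specific_path, variadic_path_to_specific_path_alt,
            ne_eq, hp, not_false_eq_true, if_true, if_false, hcount, if_neg h0, ge_iff_le,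
            if_neg hlen]
          rw [pvSubstGo_spec, if_neg hlen]
          rfl
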